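-- pv_equiv track=rewrite | github.com/juneau-project/juneau | juneau_server/util.py | last_line_var
-- ===== SOURCE A (Python) =====
-- def last_line_var(varname, code):
--     ret = 0
--     code = code.split("\n")
--
--     for id, i in enumerate(code):
--         if '=' not in i:
--             continue
--
--         j = i.split('=')
--         j = [t.strip(" ") for t in j]
--
--         if varname in j[0]:
--             if varname == j[0][-len(varname):]:
--                 ret = id + 1
--     return ret
-- ===== SOURCE B (Python) =====
-- def last_line_var(varname, code):
--     for idx, line in reversed(list(enumerate(code.split("\n")))):
--         if '=' not in line:
--             continue
--         head = line.split('=')[0].strip(' ')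
--         if varname in head and varname == head[-len(varname):]:
--             return idx + 1
--     return 0
-- ===== Notes on version B (the rewrite author's own statement) =====
-- stated objective: alternative
-- what changed: Replaces the forward scan that keeps overwriting a ret accumulator with a backward scan over the reversed enumerated lines that returns immediately at the first (i.e. last) matching assignment line; only the first '=' segment is stripped instead of mapping strip over all segments.
import Mathlib
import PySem

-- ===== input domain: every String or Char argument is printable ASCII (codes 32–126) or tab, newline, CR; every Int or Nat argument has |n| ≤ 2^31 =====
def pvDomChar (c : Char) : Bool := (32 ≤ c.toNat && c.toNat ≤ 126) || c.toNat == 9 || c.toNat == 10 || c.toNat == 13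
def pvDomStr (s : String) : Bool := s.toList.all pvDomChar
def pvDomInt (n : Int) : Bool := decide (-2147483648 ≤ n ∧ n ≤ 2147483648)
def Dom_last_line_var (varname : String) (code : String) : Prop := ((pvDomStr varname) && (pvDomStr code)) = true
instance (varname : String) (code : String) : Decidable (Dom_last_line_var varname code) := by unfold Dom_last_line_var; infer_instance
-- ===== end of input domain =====

set_option maxRecDepth 4000


-- B replaces A's forward scan with an overwritten accumulator by a backward scan with early return; alternative decomposition, same cost.

-- ===== PORT A =====
def last_line_var (varname : String) (code : String) : Int :=
  let ret : Int := 0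
  let codeL := (PySem.Str.split? code "\n").getD []
  (PySem.List.enumerate codeL 0).foldl
    (fun ret p =>
      if PySem.Str.isIn "=" p.2 then
        let j := (PySem.Str.split? p.2 "=").getD []
        let j := j.map (fun t => PySem.Str.stripChars t " ")
        let j0 := PySem.List.pyGetD j 0 ""
        if PySem.Str.isIn varname j0 then
          if varname == PySem.Str.slice j0 (some (-(PySem.Str.len varname : Int))) none
          then p.1 + 1 else ret
        else ret
      else ret) ret

-- ===== PORT B =====
def lastLineVarAltGo (varname : String) : List (Int × String) → Int
  | [] => 0
  | (idx, line) :: rest =>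
    if PySem.Str.isIn "=" line then
      let head := PySem.Str.stripChars (PySem.List.pyGetD ((PySem.Str.split? line "=").getD []) 0 "") " "
      if PySem.Str.isIn varname head
          && (varname == PySem.Str.slice head (some (-(PySem.Str.len varname : Int))) none)
      then idx + 1 else lastLineVarAltGo varname rest
    else lastLineVarAltGo varname rest

def last_line_var_alt (varname : String) (code : String) : Int :=
  lastLineVarAltGo varname ((PySem.List.enumerate ((PySem.Str.split? code "\n").getD []) 0).reverse)

-- ===== PRECONDITION & SPEC =====
def Spec_last_line_var (varname : String) (code : String) (out : Int) : Prop := out = last_line_var_alt varname code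
instance (varname : String) (code : String) (out : Int) : Decidable (Spec_last_line_var varname code out) := by unfold Spec_last_line_var; infer_instance

-- ===== CLAIM (what is proved, stated in full; the proofs are below) =====
def Claim_equal_last_line_var : Prop := ∀ (varname : String) (code : String), Dom_last_line_var varname code → Spec_last_line_var varname code (last_line_var varname code)

-- ===== LEMMAS AND PROOFS =====

-- the shared per-line match test, in B's shape
def pvP (varname line : String) : Bool :=
  PySem.Str.isIn "=" line &&
    (let head := PySem.Str.stripChars (PySem.List.pyGetD ((PySem.Str.split? line "=").getD []) 0 "") " "
     PySem.Str.isIn varname head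
       && (varname == PySem.Str.slice head (some (-(PySem.Str.len varname : Int))) none))

-- first match scanning left to right, default r
def pvLast (varname : String) : List (Int × String) → Int → Int
  | [], r => r
  | (i, s) :: t, r => if pvP varname s then i + 1 else pvLast varname t r

lemma pvHeadEq (s : String) :
    PySem.List.pyGetD (((PySem.Str.split? s "=").getD []).map (fun t => PySem.Str.stripChars t " ")) 0 "" =
      PySem.Str.stripChars (PySem.List.pyGetD ((PySem.Str.split? s "=").getD []) 0 "") " " := by
  cases h : (PySem.Str.split? s "=").getD [] with
  | nil => simp [PySem.List.pyGetD, PySem.List.pyGet?, PySem.List.pyIdx?]; decide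
  | cons x t => simp [PySem.List.pyGetD, PySem.List.pyGet?, PySem.List.pyIdx?]

-- A's loop body is pvP in accumulator form
lemma pvIteAnd (a b : Bool) (x r : Int) :
    (if a then (if b then x else r) else r) = if a && b then x else r := by
  cases a <;> cases b <;> simp

lemma pvStepA (varname : String) (r : Int) (p : Int × String) :
    (if PySem.Str.isIn "=" p.2 then
        let j := (PySem.Str.split? p.2 "=").getD []
        let j := j.map (fun t => PySem.Str.stripChars t " ")
        let j0 := PySem.List.pyGetD j 0 ""
        if PySem.Str.isIn varname j0 then
          if varname == PySem.Str.slice j0 (some (-(PySem.Str.len varname : Int))) none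
          then p.1 + 1 else r
        else r
      else r) = if pvP varname p.2 then p.1 + 1 else r := by
  simp only [pvP, pvHeadEq]
  rw [pvIteAnd, pvIteAnd, Bool.and_assoc]
  rfl

lemma pvLast_append (varname : String) (m : List (Int × String)) (x : Int × String) (r : Int) :
    pvLast varname (m ++ [x]) r = pvLast varname m (if pvP varname x.2 then x.1 + 1 else r) := by
  induction m with
  | nil => simp [pvLast]
  | cons y t ih => cases y; simp [pvLast, ih]

lemma pvFoldl_eq (varname : String) (l : List (Int × String)) (r : Int) :
    l.foldl (fun ret p =>
      if PySem.Str.isIn "=" p.2 then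
        let j := (PySem.Str.split? p.2 "=").getD []
        let j := j.map (fun t => PySem.Str.stripChars t " ")
        let j0 := PySem.List.pyGetD j 0 ""
        if PySem.Str.isIn varname j0 then
          if varname == PySem.Str.slice j0 (some (-(PySem.Str.len varname : Int))) none
          then p.1 + 1 else ret
        else ret
      else ret) r = pvLast varname l.reverse r := by
  induction l generalizing r with
  | nil => simp [pvLast]
  | cons x t ih =>
    rw [List.foldl_cons, ih, pvStepA, List.reverse_cons, ← pvLast_append]

lemma pvGo_eq (varname : String) (l : List (Int × String)) :
    lastLineVarAltGo varname l = pvLast varname l 0 := by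
  induction l with
  | nil => rfl
  | cons x t ih =>
    cases x with
    | mk i s =>
      simp only [lastLineVarAltGo, pvLast, pvP, ih]
      rw [pvIteAnd]
      rfl

-- ===== VERDICT (by name: the statement is the Claim_ definition above) =====
theorem last_line_var_spec : Claim_equal_last_line_var := by
  intro varname code _
  unfold Spec_last_line_var last_line_var last_line_var_alt
  rw [pvFoldl_eq, pvGo_eq]
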